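-- pv_equiv track=rewrite | github.com/benmeyersUSC/RandomScripts | error_correcting_codes/HammingCodes.py | print_hamming_code
-- ===== SOURCE A (Python) =====
-- green_print = lambda x: f"\033[30;42m{x}\033[0m"
--
-- red_print = lambda x: f"\033[30;41m{x}\033[0m"
--
-- def int_to_bin_list(x: int):
--     if x == 0:
--         return [0]
--
--     res = []
--     while x > 0:
--         res.append(x % 2)
--         x //= 2
--
--     return res[::-1]
--
-- def print_hamming_code(c):
--     lc = [x for x in c]
--     for i in range(len(lc)):
--         if sum(int_to_bin_list(i + 1)) == 1:
--             lc[i] = red_print(lc[i])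
--         else:
--             lc[i] = green_print(lc[i])
--     return "".join(lc)
-- ===== SOURCE B (Python) =====
-- green_print = lambda x: f"\033[30;42m{x}\033[0m"
--
-- red_print = lambda x: f"\033[30;41m{x}\033[0m"
--
-- def print_hamming_code(c):
--     res = [green_print(x) for x in c]
--     p = 1
--     while p <= len(c):
--         res[p - 1] = red_print(c[p - 1])
--         p *= 2
--     return "".join(res)
-- ===== Notes on version B (the rewrite author's own statement) =====
-- stated objective: faster
-- what changed: Instead of computing the binary digit sum of i+1 for every index to decide red vs green, B wraps every element green in one pass and then directly generates the power-of-two positions by doubling p, overwriting only those with red.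
import Mathlib
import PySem

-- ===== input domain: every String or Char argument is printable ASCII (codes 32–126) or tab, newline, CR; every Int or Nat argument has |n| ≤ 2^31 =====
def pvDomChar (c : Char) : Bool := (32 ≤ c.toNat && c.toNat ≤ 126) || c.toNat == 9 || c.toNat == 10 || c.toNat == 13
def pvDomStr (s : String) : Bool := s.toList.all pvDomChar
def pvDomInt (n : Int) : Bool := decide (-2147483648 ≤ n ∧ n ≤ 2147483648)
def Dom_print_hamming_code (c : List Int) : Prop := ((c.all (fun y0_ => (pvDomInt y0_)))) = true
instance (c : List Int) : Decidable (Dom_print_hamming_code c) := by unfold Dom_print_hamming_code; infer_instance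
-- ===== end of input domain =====

-- B replaces A's per-index bit-sum test with an all-green map followed by a doubling loop that
-- overwrites only the power-of-two positions (objective: faster, O(n) vs O(n log n) index tests).

-- ===== PORT A =====
-- module lambdas green_print / red_print (ANSI escapes as literal characters)
def pvGreen (x : Int) : String := "\x1b[30;42m" ++ PySem.Int.toStr x ++ "\x1b[0m"
def pvRed (x : Int) : String := "\x1b[30;41m" ++ PySem.Int.toStr x ++ "\x1b[0m"

-- the 'while x > 0' loop of int_to_bin_list, appending x % 2 and flooring x //= 2
def pvBitsLoop (x : Int) (res : List Int) : List Int :=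
  if _h : 0 < x then pvBitsLoop (PySem.Int.floordiv x 2) (res ++ [PySem.Int.mod x 2]) else res
termination_by x.toNat
decreasing_by
  have := PySem.Int.floordiv_eq_ediv_of_pos (a := x) (b := 2) (by omega)
  omega

def int_to_bin_list (x : Int) : List Int :=
  if x = 0 then [0] else (pvBitsLoop x []).reverse

-- for each index i: red if the binary digit sum of i+1 is 1, else green; then "".join
def print_hamming_code (c : List Int) : String :=
  String.join ((List.range c.length).map (fun i =>
    if (int_to_bin_list ((i + 1 : Nat) : Int)).sum = 1 then pvRed (c.getD i 0)
    else pvGreen (c.getD i 0)))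

-- ===== PORT B =====
-- Source B's 'while p <= len(c)' doubling loop; the counter p is always a positive Python int,
-- ported as a Nat with the (always-true at runtime) 0 < p guard for totality
def pvSetReds (c : List Int) (l : List String) (p : Nat) : List String :=
  if h : 0 < p ∧ p ≤ c.length then
    pvSetReds c (l.set (p - 1) (pvRed (c.getD (p - 1) 0))) (2 * p)
  else l
termination_by c.length + 1 - p
decreasing_by omega

def print_hamming_code_alt (c : List Int) : String :=
  String.join (pvSetReds c (c.map pvGreen) 1)

-- ===== PRECONDITION & SPEC =====
def Spec_print_hamming_code (c : List Int) (out : String) : Prop := out = print_hamming_code_alt c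
instance (c : List Int) (out : String) : Decidable (Spec_print_hamming_code c out) := by unfold Spec_print_hamming_code; infer_instance

-- ===== CLAIM (what is proved, stated in full; the proofs are below) =====
def Claim_equal_print_hamming_code : Prop := ∀ (c : List Int), Dom_print_hamming_code c → Spec_print_hamming_code c (print_hamming_code c)

-- ===== LEMMAS AND PROOFS =====

-- binary digit sum on Nat
def pvS (n : Nat) : Nat := if n = 0 then 0 else n % 2 + pvS (n / 2)

theorem pvS_zero : pvS 0 = 0 := by rw [pvS]; norm_num

theorem pvS_pos_eq (n : Nat) (h : 0 < n) : pvS n = n % 2 + pvS (n / 2) := by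
  rw [pvS, if_neg (by omega)]

theorem pvBitsLoop_sum (n : Nat) : ∀ res : List Int,
    (pvBitsLoop (n : Int) res).sum = res.sum + (pvS n : Int) := by
  induction n using Nat.strong_induction_on with
  | _ n ih =>
    intro res
    rcases Nat.eq_zero_or_pos n with h0 | hpos
    · subst h0; rw [pvBitsLoop, pvS]; simp
    · rw [pvBitsLoop]
      have h1 : (0 : Int) < (n : Int) := by exact_mod_cast hpos
      rw [dif_pos h1]
      have hf : PySem.Int.floordiv (n : Int) 2 = ((n / 2 : Nat) : Int) := by
        exact_mod_cast PySem.Int.floordiv_natCast n 2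
      have hm : PySem.Int.mod (n : Int) 2 = ((n % 2 : Nat) : Int) := by
        exact_mod_cast PySem.Int.mod_natCast n 2
      rw [hf, hm, ih (n / 2) (by omega), pvS_pos_eq n hpos]
      simp
      ring

theorem int_to_bin_sum (n : Nat) (h : 0 < n) :
    (int_to_bin_list (n : Int)).sum = (pvS n : Int) := by
  rw [int_to_bin_list, if_neg (by exact_mod_cast Nat.pos_iff_ne_zero.mp h)]
  rw [List.sum_reverse, pvBitsLoop_sum]
  simp

theorem pvS_pos (n : Nat) (h : 0 < n) : 1 ≤ pvS n := by
  induction n using Nat.strong_induction_on with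
  | _ n ih =>
    rw [pvS_pos_eq n h]
    rcases Nat.even_or_odd n with he | ho
    · obtain ⟨m, hm⟩ := he
      have : 1 ≤ pvS (n / 2) := ih (n / 2) (by omega) (by omega)
      omega
    · have : n % 2 = 1 := Nat.odd_iff.mp ho
      omega

theorem pvS_eq_one_iff (n : Nat) (h : 0 < n) : pvS n = 1 ↔ ∃ k : Nat, n = 2 ^ k := by
  induction n using Nat.strong_induction_on with
  | _ n ih =>
    rw [pvS_pos_eq n h]
    rcases Nat.eq_or_lt_of_le h with h1 | h2
    · have hn : n = 1 := h1.symm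
      subst hn
      simp [pvS_zero]
      exact ⟨0, rfl⟩
    · -- n ≥ 2
      rcases Nat.even_or_odd n with he | ho
      · obtain ⟨m, hm⟩ := he
        have hmod : n % 2 = 0 := by omega
        have hdiv : 0 < n / 2 := by omega
        rw [hmod]
        rw [Nat.zero_add, ih (n / 2) (by omega) hdiv]
        constructor
        · rintro ⟨k, hk⟩
          exact ⟨k + 1, by rw [pow_succ]; omega⟩
        · rintro ⟨k, hk⟩
          match k with
          | 0 => omega
          | k + 1 => exact ⟨k, by rw [pow_succ] at hk; omega⟩
      · have hmod : n % 2 = 1 := Nat.odd_iff.mp ho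
        have hdiv : 0 < n / 2 := by omega
        have := pvS_pos (n / 2) hdiv
        constructor
        · intro hc; omega
        · rintro ⟨k, hk⟩
          match k with
          | 0 => omega
          | k + 1 =>
            rw [pow_succ] at hk
            omega

theorem pvSetReds_length (c : List Int) (l : List String) (p : Nat) :
    (pvSetReds c l p).length = l.length := by
  induction l, p using pvSetReds.induct (c := c) with
  | case1 l p h ih => rw [pvSetReds, dif_pos h]; rw [ih]; simp
  | case2 l p h => rw [pvSetReds, dif_neg h]

theorem pvSetReds_get (c : List Int) : ∀ (p : Nat) (l : List String), 0 < p →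
    l.length = c.length → ∀ i : Nat, i < c.length →
    ((∃ k : Nat, i + 1 = p * 2 ^ k) → (pvSetReds c l p)[i]? = some (pvRed (c.getD i 0))) ∧
    ((¬ ∃ k : Nat, i + 1 = p * 2 ^ k) → (pvSetReds c l p)[i]? = l[i]?) := by
  intro p l
  induction l, p using pvSetReds.induct (c := c) with
  | case2 l p h =>
    intro hp hl i hi
    rw [pvSetReds, dif_neg h]
    constructor
    · rintro ⟨k, hk⟩
      exfalso
      have : p ≤ p * 2 ^ k := Nat.le_mul_of_pos_right p (Nat.pow_pos (by omega : 0 < 2))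
      omega
    · intro _; rfl
  | case1 l p h ih =>
    intro hp hl i hi
    rw [pvSetReds, dif_pos h]
    have hl2 : (l.set (p - 1) (pvRed (c.getD (p - 1) 0))).length = c.length := by
      simp [hl]
    obtain ⟨IH1, IH2⟩ := ih (by omega) hl2 i hi
    constructor
    · rintro ⟨k, hk⟩
      match k with
      | 0 =>
        have hip : i = p - 1 := by simp at hk; omega
        rw [IH2]
        · subst hip
          rw [List.getElem?_set_self (by omega)]
        · rintro ⟨k', hk'⟩
          have : 2 * p ≤ 2 * p * 2 ^ k' :=
            Nat.le_mul_of_pos_right _ (Nat.pow_pos (by omega : 0 < 2))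
          simp at hk
          omega
      | k + 1 =>
        exact IH1 ⟨k, by rw [hk, pow_succ]; ring⟩
    · intro hnex
      rw [IH2 (fun hx => hnex (by
        obtain ⟨k', hk'⟩ := hx
        exact ⟨k' + 1, by rw [hk', pow_succ]; ring⟩))]
      rw [List.getElem?_set_ne]
      intro hip
      exact hnex ⟨0, by omega⟩

theorem lists_eq (c : List Int) :
    (List.range c.length).map (fun i =>
      if (int_to_bin_list ((i + 1 : Nat) : Int)).sum = 1 then pvRed (c.getD i 0)
      else pvGreen (c.getD i 0)) = pvSetReds c (c.map pvGreen) 1 := by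
  apply List.ext_getElem?
  intro i
  by_cases hi : i < c.length
  · rw [List.getElem?_map, List.getElem?_range hi]
    simp only [Option.map_some]
    obtain ⟨H1, H2⟩ := pvSetReds_get c 1 (c.map pvGreen) (by omega) (by simp) i hi
    have hiff : ((int_to_bin_list ((i + 1 : Nat) : Int)).sum = 1) ↔ (∃ k : Nat, i + 1 = 1 * 2 ^ k) := by
      rw [int_to_bin_sum (i + 1) (by omega)]
      constructor
      · intro hx
        have hx' : pvS (i + 1) = 1 := by exact_mod_cast hx
        obtain ⟨k, hk⟩ := (pvS_eq_one_iff (i + 1) (by omega)).mp hx'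
        exact ⟨k, by omega⟩
      · rintro ⟨k, hk⟩
        have : pvS (i + 1) = 1 := (pvS_eq_one_iff (i + 1) (by omega)).mpr ⟨k, by omega⟩
        exact_mod_cast this
    by_cases hone : ∃ k : Nat, i + 1 = 1 * 2 ^ k
    · rw [if_pos (hiff.mpr hone), H1 hone]
    · rw [if_neg (fun hx => hone (hiff.mp hx)), H2 hone]
      rw [List.getElem?_map, List.getElem?_eq_getElem hi]
      simp [List.getD, List.getElem?_eq_getElem hi]
  · have hge : c.length ≤ i := by omega
    rw [List.getElem?_eq_none (by simpa using hge),
        List.getElem?_eq_none (by rw [pvSetReds_length]; simpa using hge)]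

-- ===== VERDICT (by name: the statement is the Claim_ definition above) =====
theorem print_hamming_code_spec : Claim_equal_print_hamming_code := by
  intro c _
  unfold Spec_print_hamming_code print_hamming_code print_hamming_code_alt
  rw [lists_eq]
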